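-- pv_equiv track=rewrite | github.com/cat2151/cat-github-watcher | src/gh_pr_phase_monitor/phase/phase_detector.py | llm_working_from_statuses
-- ===== SOURCE A (Python) =====
-- from typing import Any, Dict, List, Optional, Union
--
-- def llm_working_from_statuses(llm_statuses: List[str]) -> Optional[bool]:
--     """Determine LLM working state from ordered LLM statuses.
--
--     Returns True when the most recent state after any 'started work' entry has
--     no subsequent 'finished work' entry, False when a later 'finished work'
--     exists, and None when the statuses do not provide a signal.
--     """
--     if not llm_statuses:
--         return None
--
--     last_started_idx = None
--     last_finished_idx = None
--     reviewing_chain_finished_idx = None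
--     review_idx = None
--     started_after_review_idx = None
--
--     for idx, status in enumerate(llm_statuses):
--         lowered = status.lower()
--         if "reviewing" in lowered:
--             review_idx = idx
--             started_after_review_idx = None
--         if "started work" in lowered:
--             last_started_idx = idx
--             if review_idx is not None and idx > review_idx:
--                 started_after_review_idx = idx
--         if "finished work" in lowered:
--             last_finished_idx = idx
--             if started_after_review_idx is not None and idx > started_after_review_idx:
--                 reviewing_chain_finished_idx = idx
--
--     if last_finished_idx is not None and last_started_idx is not None and last_finished_idx > last_started_idx:
--         return False
--
--     if reviewing_chain_finished_idx is not None and (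
--         last_started_idx is None or reviewing_chain_finished_idx >= last_started_idx
--     ):
--         return False
--
--     if last_started_idx is not None and (last_finished_idx is None or last_started_idx > last_finished_idx):
--         return True
--
--     return None
-- ===== SOURCE B (Python) =====
-- from typing import List, Optional
--
-- def llm_working_from_statuses(llm_statuses: List[str]) -> Optional[bool]:
--     """Declarative re-implementation: collect the index lists of the three
--     keywords in one enumeration pass, take maxima, and characterise the
--     reviewing-chain finish as the last 'finished work' index f such that the
--     latest 'started work' s at or before f and the latest 'reviewing' r at or
--     before f satisfy r < s < f."""
--     if not llm_statuses:
--         return None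
--
--     texts = [s.lower() for s in llm_statuses]
--     reviews = [i for i, t in enumerate(texts) if "reviewing" in t]
--     starts = [i for i, t in enumerate(texts) if "started work" in t]
--     finishes = [i for i, t in enumerate(texts) if "finished work" in t]
--
--     last_started = starts[-1] if starts else None
--     last_finished = finishes[-1] if finishes else None
--
--     def chain_finish(f):
--         s_before = [s for s in starts if s <= f]
--         r_before = [r for r in reviews if r <= f]
--         return bool(s_before) and bool(r_before) and r_before[-1] < s_before[-1] < f
--
--     chain_candidates = [f for f in finishes if chain_finish(f)]
--     chain = chain_candidates[-1] if chain_candidates else None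
--
--     if last_finished is not None and last_started is not None and last_finished > last_started:
--         return False
--     if chain is not None and (last_started is None or chain >= last_started):
--         return False
--     if last_started is not None and (last_finished is None or last_started > last_finished):
--         return True
--     return None
-- ===== Notes on version B (the rewrite author's own statement) =====
-- stated objective: alternative
-- what changed: Replaces A's single-pass five-variable state machine by a declarative decomposition: one enumeration pass collects the three keyword index lists, their last elements give the maxima, and the reviewing-chain finish is characterised in closed form as the last 'finished work' index f whose latest preceding 'started work' s and 'reviewing' r satisfy r < s < f; the same three return guards are then applied.
import Mathlib
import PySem

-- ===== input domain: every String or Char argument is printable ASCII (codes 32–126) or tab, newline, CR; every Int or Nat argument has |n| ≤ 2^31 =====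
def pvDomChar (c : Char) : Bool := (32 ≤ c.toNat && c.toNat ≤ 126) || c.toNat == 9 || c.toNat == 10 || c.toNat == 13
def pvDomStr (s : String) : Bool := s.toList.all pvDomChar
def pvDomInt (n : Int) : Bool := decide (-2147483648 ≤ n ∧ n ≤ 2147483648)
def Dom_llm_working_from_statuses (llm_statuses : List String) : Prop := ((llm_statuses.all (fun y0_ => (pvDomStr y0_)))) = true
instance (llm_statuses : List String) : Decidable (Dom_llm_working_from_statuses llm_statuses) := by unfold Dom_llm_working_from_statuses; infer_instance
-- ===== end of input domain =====

-- B replaces A's five-variable one-pass state machine by a declarative decomposition: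
-- the three keyword index lists are collected once, last elements give the maxima, and the
-- reviewing-chain finish is characterised in closed form; objective: alternative (same cost).


-- ===== PORT A =====
-- loop state: (last_started_idx, last_finished_idx, reviewing_chain_finished_idx, review_idx, started_after_review_idx)
structure LlmStA where
  lastStarted : Option Int
  lastFinished : Option Int
  chain : Option Int
  review : Option Int
  armed : Option Int
deriving Repr, DecidableEq

def llmStepA (st : LlmStA) (p : Int × String) : LlmStA :=
  let idx := p.1
  let lowered := PySem.Str.lower p.2
  let st :=
    if PySem.Str.isIn "reviewing" lowered then
      { st with review := some idx, armed := none }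
    else st
  let st :=
    if PySem.Str.isIn "started work" lowered then
      { st with lastStarted := some idx,
                armed := match st.review with
                         | some r => if r < idx then some idx else st.armed
                         | none => st.armed }
    else st
  let st :=
    if PySem.Str.isIn "finished work" lowered then
      { st with lastFinished := some idx,
                chain := match st.armed with
                         | some s => if s < idx then some idx else st.chain
                         | none => st.chain }
    else st
  st

def llm_working_from_statuses (llm_statuses : List String) : Option Bool :=
  if llm_statuses = [] then none
  else
    let st := (PySem.List.enumerate llm_statuses 0).foldl llmStepA ⟨none, none, none, none, none⟩
    if (match st.lastFinished, st.lastStarted with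
        | some f, some s => decide (s < f)
        | _, _ => false) then some false
    else if (match st.chain with
             | some c => (match st.lastStarted with
                          | some s => decide (s ≤ c)
                          | none => true)
             | none => false) then some false
    else if (match st.lastStarted with
             | some s => (match st.lastFinished with
                          | some f => decide (f < s)
                          | none => true)
             | none => false) then some true
    else none

-- ===== PORT B =====
def llmChainFinish (reviews starts : List Int) (f : Int) : Bool :=
  let sb := starts.filter (fun s => decide (s ≤ f))
  let rb := reviews.filter (fun r => decide (r ≤ f))
  match rb.getLast?, sb.getLast? with
  | none, _ => false
  | _, none => false
  | some r, some s => decide (r < s) && decide (s < f)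

def llm_working_from_statuses_alt (llm_statuses : List String) : Option Bool :=
  if llm_statuses = [] then none
  else
    let texts := llm_statuses.map PySem.Str.lower
    let idxs := PySem.List.enumerate texts 0
    let reviews := (idxs.filter (fun p => PySem.Str.isIn "reviewing" p.2)).map (·.1)
    let starts := (idxs.filter (fun p => PySem.Str.isIn "started work" p.2)).map (·.1)
    let finishes := (idxs.filter (fun p => PySem.Str.isIn "finished work" p.2)).map (·.1)
    let lastStarted := starts.getLast?
    let lastFinished := finishes.getLast?
    let chain := (finishes.filter (llmChainFinish reviews starts)).getLast?
    if (match lastFinished, lastStarted with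
        | none, _ => false
        | _, none => false
        | some f, some s => decide (s < f)) then some false
    else if (match chain, lastStarted with
             | none, _ => false
             | some _, none => true
             | some c, some s => decide (s ≤ c)) then some false
    else if (match lastStarted, lastFinished with
             | none, _ => false
             | some _, none => true
             | some s, some f => decide (f < s)) then some true
    else none

-- ===== PRECONDITION & SPEC =====
def Spec_llm_working_from_statuses (llm_statuses : List String) (out : Option Bool) : Prop := out = llm_working_from_statuses_alt llm_statuses
instance (llm_statuses : List String) (out : Option Bool) : Decidable (Spec_llm_working_from_statuses llm_statuses out) := by unfold Spec_llm_working_from_statuses; infer_instance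

-- ===== CLAIM (what is proved, stated in full; the proofs are below) =====
def Claim_equal_llm_working_from_statuses : Prop := ∀ (llm_statuses : List String), Dom_llm_working_from_statuses llm_statuses → Spec_llm_working_from_statuses llm_statuses (llm_working_from_statuses llm_statuses)

-- ===== LEMMAS AND PROOFS =====
theorem llm_filter_drop (L : List Int) (t : List Int) (f : Int)
    (ht : ∀ i ∈ t, f < i) :
    (L ++ t).filter (fun s => decide (s ≤ f)) = L.filter (fun s => decide (s ≤ f)) := by
  rw [List.filter_append]
  have h0 : t.filter (fun s => decide (s ≤ f)) = [] :=
    List.filter_eq_nil_iff.mpr (fun a ha => by simpa using (by have := ht a ha; omega : ¬ a ≤ f))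
  rw [h0, List.append_nil]

theorem llm_filter_keep (L : List Int) (f : Int) (h : ∀ i ∈ L, i ≤ f) :
    L.filter (fun s => decide (s ≤ f)) = L := by
  exact List.filter_eq_self.mpr (fun a ha => decide_eq_true (h a ha))

theorem llmChainFinish_stable (R S t u : List Int) (f n : Int) (hf : f < n)
    (ht : ∀ i ∈ t, n ≤ i) (hu : ∀ i ∈ u, n ≤ i) :
    llmChainFinish (R ++ t) (S ++ u) f = llmChainFinish R S f := by
  unfold llmChainFinish
  rw [llm_filter_drop R t f (fun i hi => by have := ht i hi; omega),
      llm_filter_drop S u f (fun i hi => by have := hu i hi; omega)]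

theorem llm_filter_chain_stable (F R S t u : List Int) (n : Int)
    (hF : ∀ f ∈ F, f < n) (ht : ∀ i ∈ t, n ≤ i) (hu : ∀ i ∈ u, n ≤ i) :
    F.filter (llmChainFinish (R ++ t) (S ++ u)) = F.filter (llmChainFinish R S) := by
  apply List.filter_congr
  intro f hf
  exact llmChainFinish_stable R S t u f n (hF f hf) ht hu

theorem llmChainFinish_last (R S : List Int) (n : Int)
    (hR : ∀ i ∈ R, i ≤ n) (hS : ∀ i ∈ S, i ≤ n) :
    llmChainFinish R S n =
      (match R.getLast?, S.getLast? with
       | some r, some s => decide (r < s) && decide (s < n)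
       | _, _ => false) := by
  unfold llmChainFinish
  rw [llm_filter_keep R n hR, llm_filter_keep S n hS]
  rcases hr : R.getLast? with _ | r <;> rcases hs : S.getLast? with _ | s <;> simp only [hr, hs]

def llmArmedOf (R S : List Int) : Option Int :=
  match R.getLast?, S.getLast? with
  | some r, some s => if r < s then some s else none
  | _, _ => none

def llmChainOf (R S F : List Int) : Option Int :=
  (F.filter (llmChainFinish R S)).getLast?

theorem llmChainOf_stable (R S F t u : List Int) (n : Int)
    (hF : ∀ f ∈ F, f < n) (ht : ∀ i ∈ t, n ≤ i) (hu : ∀ i ∈ u, n ≤ i) :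
    llmChainOf (R ++ t) (S ++ u) F = llmChainOf R S F := by
  unfold llmChainOf
  rw [llm_filter_chain_stable F R S t u n hF ht hu]

theorem llmChainOf_step (R S F t u : List Int) (n : Int)
    (hR : ∀ i ∈ R, i < n) (hS : ∀ i ∈ S, i < n) (hF : ∀ f ∈ F, f < n)
    (ht : ∀ i ∈ t, i = n) (hu : ∀ i ∈ u, i = n) :
    llmChainOf (R ++ t) (S ++ u) (F ++ [n]) =
      (match (R ++ t).getLast?, (S ++ u).getLast? with
       | some r, some s => if r < s ∧ s < n then some n else llmChainOf R S F
       | _, _ => llmChainOf R S F) := by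
  unfold llmChainOf
  rw [List.filter_append,
      llm_filter_chain_stable F R S t u n hF (fun i hi => le_of_eq (ht i hi).symm)
        (fun i hi => le_of_eq (hu i hi).symm)]
  have hcn : llmChainFinish (R ++ t) (S ++ u) n =
      (match (R ++ t).getLast?, (S ++ u).getLast? with
       | some r, some s => decide (r < s) && decide (s < n)
       | _, _ => false) := by
    apply llmChainFinish_last
    · intro i hi
      rcases List.mem_append.mp hi with h | h
      · exact le_of_lt (hR i h)
      · exact le_of_eq (ht i h)
    · intro i hi
      rcases List.mem_append.mp hi with h | h
      · exact le_of_lt (hS i h)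
      · exact le_of_eq (hu i h)
  rcases hr0 : (R ++ t).getLast? with _ | r <;> rcases hs0 : (S ++ u).getLast? with _ | s <;>
    simp only [List.filter_cons, List.filter_nil, hcn, hr0, hs0, llmChainOf]
  · simp
  · simp
  · simp
  · by_cases hlt : r < s ∧ s < n
    · simp [hlt.1, hlt.2, List.getLast?_concat, hlt]
    · have hb : (decide (r < s) && decide (s < n)) = false := by
        simp only [Bool.and_eq_false_iff, decide_eq_false_iff_not]; tauto
      simp [hb, hlt]

theorem llmStepA_spec (y : String) (R S F : List Int) (n : Int)
    (hR : ∀ i ∈ R, 0 ≤ i ∧ i < n) (hS : ∀ i ∈ S, 0 ≤ i ∧ i < n) (hF : ∀ i ∈ F, 0 ≤ i ∧ i < n) :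
    llmStepA ⟨S.getLast?, F.getLast?, llmChainOf R S F, R.getLast?, llmArmedOf R S⟩ (n, y) =
      (let rv := PySem.Str.isIn "reviewing" (PySem.Str.lower y)
       let st := PySem.Str.isIn "started work" (PySem.Str.lower y)
       let fn := PySem.Str.isIn "finished work" (PySem.Str.lower y)
       let R' := R ++ if rv then [n] else []
       let S' := S ++ if st then [n] else []
       let F' := F ++ if fn then [n] else []
       ⟨S'.getLast?, F'.getLast?, llmChainOf R' S' F', R'.getLast?, llmArmedOf R' S'⟩) := by
  have hRn : ∀ i ∈ R, i < n := fun i hi => (hR i hi).2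
  have hSn : ∀ i ∈ S, i < n := fun i hi => (hS i hi).2
  have hFn : ∀ i ∈ F, i < n := fun i hi => (hF i hi).2
  simp only []
  unfold llmStepA
  cases hrv : PySem.Str.isIn "reviewing" (PySem.Str.lower y) <;>
  cases hst : PySem.Str.isIn "started work" (PySem.Str.lower y) <;>
  cases hfn : PySem.Str.isIn "finished work" (PySem.Str.lower y) <;>
    simp only [hrv, hst, hfn, if_true, if_false, List.append_nil, LlmStA.mk.injEq,
      Bool.false_eq_true, List.getLast?_concat]
  case false.false.true =>
    refine ⟨trivial, trivial, ?_, trivial, trivial⟩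
    have hstep := llmChainOf_step R S F [] [] n hRn hSn hFn (by simp) (by simp)
    simp only [List.append_nil] at hstep
    rw [hstep]
    rcases hr0 : R.getLast? with _ | r <;> rcases hs0 : S.getLast? with _ | s <;>
      simp only [llmArmedOf, hr0, hs0]
    by_cases hlt : r < s
    · have hsn : s < n := hSn s (List.mem_of_getLast? hs0)
      simp [hlt, hsn]
    · simp [hlt, fun h : r < s ∧ s < n => hlt h.1]
  case false.true.false =>
    refine ⟨trivial, trivial, ?_, trivial, ?_⟩
    · simpa using (llmChainOf_stable R S F [] [n] n hFn (by simp) (by simp)).symm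
    · rcases hr0 : R.getLast? with _ | r <;>
        simp only [llmArmedOf, hr0, List.getLast?_concat]
      have : r < n := hRn r (List.mem_of_getLast? hr0)
      simp [this]
  case false.true.true =>
    refine ⟨trivial, trivial, ?_, trivial, ?_⟩
    · have hstep := llmChainOf_step R S F [] [n] n hRn hSn hFn (by simp) (by simp)
      simp only [List.append_nil, List.getLast?_concat] at hstep
      rw [hstep]
      rcases hr0 : R.getLast? with _ | r <;>
        simp only [llmArmedOf, hr0]
      have : r < n := hRn r (List.mem_of_getLast? hr0)
      simp [this, lt_irrefl]
    · rcases hr0 : R.getLast? with _ | r <;>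
        simp only [llmArmedOf, hr0, List.getLast?_concat]
      have : r < n := hRn r (List.mem_of_getLast? hr0)
      simp [this]
  case true.false.false =>
    refine ⟨trivial, trivial, ?_, trivial, ?_⟩
    · simpa using (llmChainOf_stable R S F [n] [] n hFn (by simp) (by simp)).symm
    · rcases hs0 : S.getLast? with _ | s <;>
        simp only [llmArmedOf, hs0, List.getLast?_concat]
      have : s < n := hSn s (List.mem_of_getLast? hs0)
      simp [show ¬ n < s by omega]
  case true.false.true =>
    refine ⟨trivial, trivial, ?_, trivial, ?_⟩
    · have hstep := llmChainOf_step R S F [n] [] n hRn hSn hFn (by simp) (by simp)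
      simp only [List.append_nil, List.getLast?_concat] at hstep
      rw [hstep]
      rcases hs0 : S.getLast? with _ | s <;> simp only [hs0]
      have : s < n := hSn s (List.mem_of_getLast? hs0)
      simp [show ¬ (n < s ∧ s < n) by omega]
    · rcases hs0 : S.getLast? with _ | s <;>
        simp only [llmArmedOf, hs0, List.getLast?_concat]
      have : s < n := hSn s (List.mem_of_getLast? hs0)
      simp [show ¬ n < s by omega]
  case true.true.false =>
    refine ⟨trivial, trivial, ?_, trivial, ?_⟩
    · simpa using (llmChainOf_stable R S F [n] [n] n hFn (by simp) (by simp)).symm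
    · simp [llmArmedOf, List.getLast?_concat, lt_irrefl]
  case true.true.true =>
    refine ⟨trivial, trivial, ?_, trivial, ?_⟩
    · have hstep := llmChainOf_step R S F [n] [n] n hRn hSn hFn (by simp) (by simp)
      simp only [List.getLast?_concat] at hstep
      rw [hstep]
      simp [lt_irrefl]
    · simp [llmArmedOf, List.getLast?_concat, lt_irrefl]

def llmKwIdx (kw : String) (xs : List String) : List Int :=
  ((PySem.List.enumerate (xs.map PySem.Str.lower) 0).filter (fun p => PySem.Str.isIn kw p.2)).map (·.1)

theorem llmKwIdx_append (kw : String) (xs : List String) (y : String) :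
    llmKwIdx kw (xs ++ [y]) =
      llmKwIdx kw xs ++
        (if PySem.Str.isIn kw (PySem.Str.lower y) then [(xs.length : Int)] else []) := by
  unfold llmKwIdx
  rw [List.map_append, PySem.List.enumerate_append, List.filter_append, List.map_append]
  have he : PySem.List.enumerate ([y].map PySem.Str.lower) (0 + (xs.map PySem.Str.lower).length) =
      [((xs.length : Int), PySem.Str.lower y)] := by
    simp [PySem.List.enumerate]
  rw [he]
  by_cases h : PySem.Chars.isIn kw.toList (PySem.Chars.lower y.toList) = true
  · simp [List.filter, h]
  · simp [List.filter, Bool.eq_false_iff.mpr h]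

theorem mem_llmKwIdx_lt (kw : String) (xs : List String) {i : Int}
    (h : i ∈ llmKwIdx kw xs) : 0 ≤ i ∧ i < xs.length := by
  unfold llmKwIdx at h
  simp only [List.mem_map, List.mem_filter] at h
  obtain ⟨p, ⟨hp, _⟩, rfl⟩ := h
  rw [PySem.List.mem_enumerate_iff] at hp
  obtain ⟨k, hk, rfl⟩ := hp
  simp at hk ⊢
  omega

theorem llm_fold_eq (xs : List String) :
    (PySem.List.enumerate xs 0).foldl llmStepA ⟨none, none, none, none, none⟩ =
      ⟨(llmKwIdx "started work" xs).getLast?, (llmKwIdx "finished work" xs).getLast?,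
       llmChainOf (llmKwIdx "reviewing" xs) (llmKwIdx "started work" xs) (llmKwIdx "finished work" xs),
       (llmKwIdx "reviewing" xs).getLast?,
       llmArmedOf (llmKwIdx "reviewing" xs) (llmKwIdx "started work" xs)⟩ := by
  induction xs using List.reverseRecOn with
  | nil => rfl
  | append_singleton ys y ih =>
    have hen : PySem.List.enumerate (ys ++ [y]) 0 =
        PySem.List.enumerate ys 0 ++ [((ys.length : Int), y)] := by
      rw [PySem.List.enumerate_append]; simp [PySem.List.enumerate]
    rw [hen, List.foldl_append, ih]
    simp only [List.foldl_cons, List.foldl_nil]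
    rw [llmStepA_spec y _ _ _ (ys.length : Int)
      (fun i hi => mem_llmKwIdx_lt _ ys hi) (fun i hi => mem_llmKwIdx_lt _ ys hi)
      (fun i hi => mem_llmKwIdx_lt _ ys hi)]
    simp only [llmKwIdx_append]

-- the two renderings of the three final guards agree for every triple of maxima
theorem llm_guards_eq (ls lf ch : Option Int) :
    (if (match lf, ls with
         | some f, some s => decide (s < f)
         | _, _ => false) then some false
     else if (match ch with
              | some c => (match ls with
                           | some s => decide (s ≤ c)
                           | none => true)
              | none => false) then some false
     else if (match ls with
              | some s => (match lf with
                           | some f => decide (f < s)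
                           | none => true)
              | none => false) then (some true : Option Bool)
     else none) =
    (if (match lf, ls with
         | none, _ => false
         | _, none => false
         | some f, some s => decide (s < f)) then some false
     else if (match ch, ls with
              | none, _ => false
              | some _, none => true
              | some c, some s => decide (s ≤ c)) then some false
     else if (match ls, lf with
              | none, _ => false
              | some _, none => true
              | some s, some f => decide (f < s)) then some true
     else none) := by
  rcases ls <;> rcases lf <;> rcases ch <;> rfl

-- ===== VERDICT (by name: the statement is the Claim_ definition above) =====
theorem llm_working_from_statuses_spec : Claim_equal_llm_working_from_statuses := by
  intro xs _
  unfold Spec_llm_working_from_statuses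
  unfold llm_working_from_statuses llm_working_from_statuses_alt
  by_cases h : xs = []
  · simp [h]
  · simp only [h, if_false]
    rw [llm_fold_eq]
    exact llm_guards_eq _ _ _
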